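-- pv_equiv track=rewrite | github.com/chrisRduckworth/Advent-of-Code | day_10.py | mark_adjacent_tiles
-- ===== SOURCE A (Python) =====
-- def mark_adjacent_tiles(maze, position, facing):
--     """marks adjacent tiles I or O if they're inside/outside"""
--     # pad maze for when the position is at the edge
--     x, y = (position[0] + 1, position[1] + 1)
--     padded_maze = ["." * (len(maze[0]) + 2), *[f".{row}." for row in maze], "." * (len(maze[0]) + 2)]
--     if facing == "N":
--         if padded_maze[y][x-1] not in "FJ7L|-S":
--             padded_maze[y] = padded_maze[y][:x-1] + "I" + padded_maze[y][x:]
--         if padded_maze[y][x+1] not in "FJ7L|-S":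
--             padded_maze[y] = padded_maze[y][:x+1] + "O" + padded_maze[y][x+2:]
--     elif facing == "E":
--         if padded_maze[y-1][x] not in "FJ7L|-S":
--             padded_maze[y-1] = padded_maze[y-1][:x] + "I" + padded_maze[y-1][x+1:]
--         if padded_maze[y+1][x] not in "FJ7L|-S":
--             padded_maze[y+1] = padded_maze[y+1][:x] + "O" + padded_maze[y+1][x+1:]
--     elif facing == "S":
--         if padded_maze[y][x-1] not in "FJ7L|-S":
--             padded_maze[y] = padded_maze[y][:x-1] + "O" + padded_maze[y][x:]
--         if padded_maze[y][x+1] not in "FJ7L|-S":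
--             padded_maze[y] = padded_maze[y][:x+1] + "I" + padded_maze[y][x+2:]
--     elif facing == "W":
--         if padded_maze[y-1][x] not in "FJ7L|-S":
--             padded_maze[y-1] = padded_maze[y-1][:x] + "O" + padded_maze[y-1][x+1:]
--         if padded_maze[y+1][x] not in "FJ7L|-S":
--             padded_maze[y+1] = padded_maze[y+1][:x] + "I" + padded_maze[y+1][x+1:]
--     return [row[1:-1] for row in padded_maze[1:-1]]
-- ===== SOURCE B (Python) =====
-- def mark_adjacent_tiles(maze, position, facing):
--     """marks adjacent tiles I or O if they're inside/outside"""
--     offsets = {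
--         "N": [(-1, 0, "I"), (1, 0, "O")],
--         "S": [(-1, 0, "O"), (1, 0, "I")],
--         "E": [(0, -1, "I"), (0, 1, "O")],
--         "W": [(0, -1, "O"), (0, 1, "I")],
--     }
--     rows = list(maze)
--     for dx, dy, label in offsets.get(facing, []):
--         nx, ny = position[0] + dx, position[1] + dy
--         if 0 <= ny < len(rows) and 0 <= nx < len(rows[ny]) and rows[ny][nx] not in "FJ7L|-S":
--             rows[ny] = rows[ny][:nx] + label + rows[ny][nx + 1:]
--     return rows
-- ===== Notes on version B (the rewrite author's own statement) =====
-- stated objective: simpler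
-- what changed: B drops A's pad-whole-maze/slice-per-branch/strip construction entirely: a facing-to-offset table drives one bounds-checked loop that rebuilds at most two rows of the original maze, instead of A's four duplicated branches over a padded copy of every row; B therefore does O(h+w) work where A copies and strips the whole O(h*w) grid.
-- outside the precondition, e.g. on mark_adjacent_tiles(['ab', 'cd'], (-1, 0), 'N'): A returns ['ObI.ab', 'cd'], B returns ['Ob', 'cd']; on mark_adjacent_tiles(['a', 'bcd'], (2, 1), 'E'): A raises IndexError, B returns ['a', 'bcd']
import Mathlib
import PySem

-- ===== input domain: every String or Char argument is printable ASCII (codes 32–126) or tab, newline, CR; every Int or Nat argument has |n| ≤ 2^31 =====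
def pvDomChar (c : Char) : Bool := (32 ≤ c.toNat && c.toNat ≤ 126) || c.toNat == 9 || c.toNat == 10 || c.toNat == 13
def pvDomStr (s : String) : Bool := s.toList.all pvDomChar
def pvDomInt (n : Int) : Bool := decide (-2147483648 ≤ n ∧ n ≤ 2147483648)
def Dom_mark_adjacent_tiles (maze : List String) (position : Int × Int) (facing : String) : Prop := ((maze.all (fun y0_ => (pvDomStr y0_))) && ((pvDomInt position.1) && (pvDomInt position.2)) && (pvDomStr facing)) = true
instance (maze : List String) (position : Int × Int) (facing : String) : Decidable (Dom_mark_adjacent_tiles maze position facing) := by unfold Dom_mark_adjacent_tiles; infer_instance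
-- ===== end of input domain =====

-- B replaces A's pad-copy-strip of the whole maze and four duplicated branches by a facing→offset
-- table and one bounds-checked marking loop on the original rows (objective: simpler; neither
-- implementation mutates its arguments).

-- ===== PORT A =====
-- `c not in "FJ7L|-S"` on a single character (both Pythons use the same test)
def pvNotPipe (c : Char) : Bool := !(['F', 'J', '7', 'L', '|', '-', 'S'].contains c)

-- `if row[i] not in "FJ7L|-S": row = row[:i] + ch + row[i+1:]`; none = IndexError on the read
def pvMarkA (row : List Char) (i : Int) (ch : Char) : Option (List Char) :=
  match PySem.List.pyGet? row i with
  | none => none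
  | some c =>
    some (if pvNotPipe c then
            PySem.List.slice row none (some i) ++ ch :: PySem.List.slice row (some (i + 1)) none
          else row)

-- read padded_maze[yi], mark column xi, assign the row back; none = IndexError
def pvStepA (p : List (List Char)) (yi xi : Int) (ch : Char) : Option (List (List Char)) :=
  match PySem.List.pyGet? p yi with
  | none => none
  | some row =>
    match pvMarkA row xi ch with
    | none => none
    | some row' => PySem.List.pySet? p yi row'

def mark_adjacent_tiles (maze : List String) (position : Int × Int) (facing : String) : List String :=
  match maze with
  | [] => []  -- Python raises IndexError on maze[0]; excluded by Pre_
  | r0 :: _ =>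
    let x := position.1 + 1
    let y := position.2 + 1
    let pad : List Char := List.replicate (r0.toList.length + 2) '.'
    let padded : List (List Char) :=
      pad :: maze.map (fun r => '.' :: r.toList ++ ['.']) ++ [pad]
    let res : Option (List (List Char)) :=
      if facing = "N" then
        match pvStepA padded y (x - 1) 'I' with
        | none => none
        | some p => pvStepA p y (x + 1) 'O'
      else if facing = "E" then
        match pvStepA padded (y - 1) x 'I' with
        | none => none
        | some p => pvStepA p (y + 1) x 'O'
      else if facing = "S" then
        match pvStepA padded y (x - 1) 'O' with
        | none => none
        | some p => pvStepA p y (x + 1) 'I'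
      else if facing = "W" then
        match pvStepA padded (y - 1) x 'O' with
        | none => none
        | some p => pvStepA p (y + 1) x 'I'
      else some padded
    match res with
    | none => []  -- Python raised; excluded by Pre_
    | some p =>
      (PySem.List.slice p (some 1) (some (-1))).map
        (fun row => String.ofList (PySem.List.slice row (some 1) (some (-1))))

-- ===== PORT B =====
def pvOffsets (facing : String) : List (Int × Int × Char) :=
  if facing = "N" then [(-1, 0, 'I'), (1, 0, 'O')]
  else if facing = "S" then [(-1, 0, 'O'), (1, 0, 'I')]
  else if facing = "E" then [(0, -1, 'I'), (0, 1, 'O')]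
  else if facing = "W" then [(0, -1, 'O'), (0, 1, 'I')]
  else []

def pvStepB (rows : List String) (nx ny : Int) (label : Char) : List String :=
  if 0 ≤ ny ∧ ny < (rows.length : Int) then
    match rows[ny.toNat]? with
    | none => rows
    | some row =>
      let cs := row.toList
      if 0 ≤ nx ∧ nx < (cs.length : Int) ∧ pvNotPipe (cs.getD nx.toNat ' ') then
        rows.set ny.toNat (String.ofList (cs.take nx.toNat ++ label :: cs.drop (nx.toNat + 1)))
      else rows
  else rows

def mark_adjacent_tiles_alt (maze : List String) (position : Int × Int) (facing : String) : List String :=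
  (pvOffsets facing).foldl
    (fun rows off => pvStepB rows (position.1 + off.1) (position.2 + off.2.1) off.2.2) maze

-- ===== PRECONDITION & SPEC =====
-- Pre_ restricts to the function's natural domain: a nonempty maze and, when facing is one of the
-- four directions that mark anything, a rectangular maze with the position inside it. Outside it A
-- raises IndexError (empty maze, ragged or too-short rows, far positions) or, for positions on/over
-- the border, returns accidental values of its padding trick (Python negative-index wraparound
-- duplicating row contents).
def Pre_mark_adjacent_tiles (maze : List String) (position : Int × Int) (facing : String) : Prop :=
  maze ≠ [] ∧
  ((facing = "N" ∨ facing = "E" ∨ facing = "S" ∨ facing = "W") →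
    (∀ r ∈ maze, r.toList.length = (maze.headD "").toList.length) ∧
    0 ≤ position.1 ∧ position.1 < ((maze.headD "").toList.length : Int) ∧
    0 ≤ position.2 ∧ position.2 < (maze.length : Int))

instance (maze : List String) (position : Int × Int) (facing : String) : Decidable (Pre_mark_adjacent_tiles maze position facing) := by unfold Pre_mark_adjacent_tiles; infer_instance

def pvWitness_mark_adjacent_tiles : List String × (Int × Int) × String := (["S-", "L."], (0, 0), "N")

def Spec_mark_adjacent_tiles (maze : List String) (position : Int × Int) (facing : String) (out : List String) : Prop := out = mark_adjacent_tiles_alt maze position facing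
instance (maze : List String) (position : Int × Int) (facing : String) (out : List String) : Decidable (Spec_mark_adjacent_tiles maze position facing out) := by unfold Spec_mark_adjacent_tiles; infer_instance

-- ===== CLAIM (what is proved, stated in full; the proofs are below) =====
def Claim_equal_mark_adjacent_tiles : Prop := ∀ (maze : List String) (position : Int × Int) (facing : String), Dom_mark_adjacent_tiles maze position facing → Pre_mark_adjacent_tiles maze position facing → Spec_mark_adjacent_tiles maze position facing (mark_adjacent_tiles maze position facing)

-- ===== LEMMAS AND PROOFS =====

-- invariant tying A's padded maze to B's row list
def pvGoodRow (w : Nat) (r : String) (prow : List Char) : Prop :=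
  ∃ a b, prow = a :: r.toList ++ [b] ∧ pvNotPipe a = true ∧ pvNotPipe b = true ∧
    r.toList.length = w

def pvGoodPad (w : Nat) (t : List Char) : Prop :=
  t.length = w + 2 ∧ ∀ c ∈ t, pvNotPipe c = true

def pvInv (w : Nat) (rows : List String) (p : List (List Char)) : Prop :=
  ∃ t mid bb, p = t :: mid ++ [bb] ∧ pvGoodPad w t ∧ pvGoodPad w bb ∧
    List.Forall₂ (pvGoodRow w) rows mid

lemma pv_strip_pad {α : Type} (x y : α) (l : List α) :
    PySem.List.slice (x :: l ++ [y]) (some 1) (some (-1)) = l := by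
  simp [PySem.List.slice, PySem.List.clampIdx]
  rw [List.take_append_of_le_length (by split <;> omega)]
  rw [List.take_of_length_le (by split <;> omega)]

lemma pv_pySet?_of_range {α : Type} (l : List α) (i : Int) (v : α) (h0 : 0 ≤ i)
    (h1 : i < l.length) : PySem.List.pySet? l i v = some (l.set i.toNat v) := by
  unfold PySem.List.pySet? PySem.List.pyIdx?
  rw [if_pos h0, if_pos h1]; rfl

lemma pv_forall₂_get {R : String → List Char → Prop} {rows : List String}
    {mid : List (List Char)} (h : List.Forall₂ R rows mid) (i : Nat) (r : String)
    (hr : rows[i]? = some r) : ∃ m, mid[i]? = some m ∧ R r m := by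
  induction h generalizing i with
  | nil => simp at hr
  | cons hab hF ih =>
    cases i with
    | zero => simp_all
    | succ j => simp only [List.getElem?_cons_succ] at hr ⊢; exact ih j hr

lemma pv_forall₂_set_right {R : String → List Char → Prop} {rows : List String}
    {mid : List (List Char)} (h : List.Forall₂ R rows mid) (i : Nat) {r : String}
    {m : List Char} (hr : rows[i]? = some r) (hrm : R r m) :
    List.Forall₂ R rows (mid.set i m) := by
  induction h generalizing i with
  | nil => simp_all
  | cons hab hF ih =>
    cases i with
    | zero => simp only [List.getElem?_cons_zero, Option.some.injEq] at hr
              subst hr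
              exact List.Forall₂.cons hrm hF
    | succ j => simp only [List.set_cons_succ, List.getElem?_cons_succ] at hr ⊢
                exact List.Forall₂.cons hab (ih j hr)

lemma pv_forall₂_set {R : String → List Char → Prop} {rows : List String}
    {mid : List (List Char)} (h : List.Forall₂ R rows mid) (i : Nat) {r : String}
    {m : List Char} (hrm : R r m) : List.Forall₂ R (rows.set i r) (mid.set i m) := by
  induction h generalizing i with
  | nil => simp_all
  | cons hab hF ih =>
    cases i with
    | zero => exact List.Forall₂.cons hrm hF
    | succ j => exact List.Forall₂.cons hab (ih j)

lemma pvInv_init (maze : List String) (w : Nat) (hw : ∀ r ∈ maze, r.toList.length = w) :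
    pvInv w maze ((List.replicate (w + 2) '.') :: maze.map (fun r => '.' :: r.toList ++ ['.'])
      ++ [List.replicate (w + 2) '.']) := by
  refine ⟨_, _, _, rfl, ⟨by simp, ?_⟩, ⟨by simp, ?_⟩, ?_⟩
  · intro c hc; rw [List.eq_of_mem_replicate hc]; decide
  · intro c hc; rw [List.eq_of_mem_replicate hc]; decide
  · induction maze with
    | nil => exact List.Forall₂.nil
    | cons r rest ih =>
      exact List.Forall₂.cons ⟨'.', '.', rfl, by decide, by decide, hw r (by simp)⟩
        (ih (fun s hs => hw s (by simp [hs])))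

lemma pvInv_strip (w : Nat) (rows : List String) (p : List (List Char)) (h : pvInv w rows p) :
    (PySem.List.slice p (some 1) (some (-1))).map
      (fun row => String.ofList (PySem.List.slice row (some 1) (some (-1)))) = rows := by
  obtain ⟨t, mid, bb, rfl, -, -, hF⟩ := h
  rw [pv_strip_pad]
  induction hF with
  | nil => rfl
  | @cons r m rest mids hab hF ih =>
    obtain ⟨a, b, rfl, -, -, -⟩ := hab
    simp only [List.map_cons, ih, List.cons.injEq, and_true]
    rw [pv_strip_pad, String.ofList_toList]


lemma pvMarkA_write (row : List Char) (i : Int) (ch : Char) (h0 : 0 ≤ i)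
    (h1 : i < row.length) (hc : pvNotPipe (row.getD i.toNat ' ') = true) :
    pvMarkA row i ch = some (row.take i.toNat ++ ch :: row.drop (i.toNat + 1)) := by
  have h1' : i.toNat < row.length := by omega
  unfold pvMarkA
  rw [PySem.List.pyGet?_eq_some_getElem row h0 (by exact_mod_cast h1)]
  rw [List.getD_eq_getElem row ' ' h1'] at hc
  simp only [hc, if_pos]
  rw [PySem.List.slice_to row h0, PySem.List.slice_from row (by omega),
    show (i + 1).toNat = i.toNat + 1 from by omega]

lemma pvMarkA_skip (row : List Char) (i : Int) (ch : Char) (h0 : 0 ≤ i)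
    (h1 : i < row.length) (hc : pvNotPipe (row.getD i.toNat ' ') = false) :
    pvMarkA row i ch = some row := by
  have h1' : i.toNat < row.length := by omega
  unfold pvMarkA
  rw [PySem.List.pyGet?_eq_some_getElem row h0 (by exact_mod_cast h1)]
  rw [List.getD_eq_getElem row ' ' h1'] at hc
  simp [hc]

lemma pvStepB_out (rows : List String) (nx ny : Int) (label : Char)
    (h : ¬(0 ≤ ny ∧ ny < (rows.length : Int))) : pvStepB rows nx ny label = rows := by
  unfold pvStepB; rw [if_neg h]

lemma pvStepB_in (rows : List String) (nx ny : Int) (label : Char) (r : String)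
    (hy : 0 ≤ ny ∧ ny < (rows.length : Int)) (hr : rows[ny.toNat]? = some r) :
    pvStepB rows nx ny label =
      if 0 ≤ nx ∧ nx < (r.toList.length : Int) ∧ pvNotPipe (r.toList.getD nx.toNat ' ') = true
      then rows.set ny.toNat
        (String.ofList (r.toList.take nx.toNat ++ label :: r.toList.drop (nx.toNat + 1)))
      else rows := by
  unfold pvStepB
  rw [if_pos hy, hr]

lemma pv_strip_pad_map (maze : List String) (pad : List Char) :
    (PySem.List.slice ((pad :: maze.map (fun r => '.' :: r.toList ++ ['.'])) ++ [pad])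
        (some 1) (some (-1))).map
      (fun row => String.ofList (PySem.List.slice row (some 1) (some (-1)))) = maze := by
  rw [pv_strip_pad]
  induction maze with
  | nil => rfl
  | cons r rest ih => simp only [List.map_cons, List.map_map] at ih ⊢
                      rw [pv_strip_pad, String.ofList_toList, ih]

lemma pvStepB_length (rows : List String) (nx ny : Int) (label : Char) :
    (pvStepB rows nx ny label).length = rows.length := by
  unfold pvStepB
  split
  · split
    · rfl
    · dsimp only
      split <;> simp
  · rfl

lemma pvStep_corr (w : Nat) (rows : List String) (p : List (List Char)) (nx ny : Int)
    (label : Char) (hInv : pvInv w rows p) (hlab : pvNotPipe label = true)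
    (hnx1 : -1 ≤ nx) (hnx2 : nx ≤ w) (hny1 : -1 ≤ ny) (hny2 : ny ≤ rows.length)
    (hcross : (0 ≤ ny ∧ ny < rows.length) ∨ (0 ≤ nx ∧ nx < w)) :
    ∃ p', pvStepA p (ny + 1) (nx + 1) label = some p' ∧
      pvInv w (pvStepB rows nx ny label) p' := by
  obtain ⟨t, mid, bb, rfl, ⟨htl, htm⟩, ⟨hbl, hbm⟩, hF⟩ := hInv
  have hlen : rows.length = mid.length := hF.length_eq
  by_cases hy0 : ny = -1
  · -- marks the top padding row; stripped away, B does nothing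
    subst hy0
    rw [show (-1 : Int) + 1 = 0 from by norm_num]
    unfold pvStepA
    rw [PySem.List.pyGet?_of_nonneg _ le_rfl,
      show (t :: mid ++ [bb])[(0 : Int).toNat]? = some t from rfl]
    try dsimp only
    have hxr : nx + 1 < ((t.length : Nat) : Int) := by rw [htl]; push_cast; omega
    have hchar : pvNotPipe (t.getD (nx + 1).toNat ' ') = true := by
      rw [List.getD_eq_getElem t ' ' (by omega)]
      exact htm _ (List.getElem_mem _)
    rw [pvMarkA_write t (nx + 1) label (by omega) hxr hchar]
    try dsimp only
    rw [pv_pySet?_of_range (t :: mid ++ [bb]) 0 _ (by omega) (by simp; omega)]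
    refine ⟨_, rfl, ?_⟩
    rw [pvStepB_out rows nx (-1) label (by rintro ⟨h1, -⟩; omega)]
    refine ⟨List.take (nx + 1).toNat t ++ label :: List.drop ((nx + 1).toNat + 1) t, mid, bb, by simp, ⟨?_, ?_⟩, ⟨hbl, hbm⟩, hF⟩
    · simp only [List.length_append, List.length_take, List.length_cons, List.length_drop]
      omega
    · intro c hc
      rcases List.mem_append.1 hc with h | h
      · exact htm c (List.mem_of_mem_take h)
      · rcases List.mem_cons.1 h with rfl | h
        · exact hlab
        · exact htm c (List.mem_of_mem_drop h)
  · by_cases hyh : ny = (rows.length : Int)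
    · -- marks the bottom padding row; stripped away, B does nothing
      have hny : 0 ≤ ny := by omega
      have eny : (ny + 1).toNat = mid.length + 1 := by omega
      unfold pvStepA
      rw [PySem.List.pyGet?_of_nonneg _ (by omega), eny]
      rw [show t :: mid ++ [bb] = (t :: mid) ++ [bb] from rfl,
        List.getElem?_append_right (by simp),
        show mid.length + 1 - (t :: mid).length = 0 from by simp, List.getElem?_cons_zero]
      try dsimp only
      have hxw : 0 ≤ nx ∧ nx < (w : Int) := by
        rcases hcross with h | h
        · exact absurd h (by omega)
        · exact h
      have hxr : nx + 1 < ((bb.length : Nat) : Int) := by rw [hbl]; push_cast; omega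
      have hchar : pvNotPipe (bb.getD (nx + 1).toNat ' ') = true := by
        rw [List.getD_eq_getElem bb ' ' (by omega)]
        exact hbm _ (List.getElem_mem _)
      rw [pvMarkA_write bb (nx + 1) label (by omega) hxr hchar]
      try dsimp only
      rw [pv_pySet?_of_range (t :: mid ++ [bb]) (ny + 1) _ (by omega) (by simp; omega)]
      refine ⟨_, rfl, ?_⟩
      rw [pvStepB_out rows nx ny label (by rintro ⟨-, h2⟩; omega)]
      refine ⟨t, mid, List.take (nx + 1).toNat bb ++ label :: List.drop ((nx + 1).toNat + 1) bb, by rw [eny]; simp, ⟨htl, htm⟩, ⟨?_, ?_⟩, hF⟩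
      · simp only [List.length_append, List.length_take, List.length_cons, List.length_drop]
        omega
      · intro c hc
        rcases List.mem_append.1 hc with h | h
        · exact hbm c (List.mem_of_mem_take h)
        · rcases List.mem_cons.1 h with rfl | h
          · exact hlab
          · exact hbm c (List.mem_of_mem_drop h)
    · -- interior row
      have hyin : 0 ≤ ny ∧ ny < (rows.length : Int) := by omega
      have hny' : ny.toNat < rows.length := by omega
      have hr : rows[ny.toNat]? = some rows[ny.toNat] := List.getElem?_eq_getElem hny'
      obtain ⟨m, hm, a, b, hmeq, ha, hb, hwlen⟩ := pv_forall₂_get hF ny.toNat _ hr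
      subst hmeq
      have hmlen : (a :: rows[ny.toNat].toList ++ [b]).length = w + 2 := by simp [hwlen]
      have emid : (t :: mid ++ [bb])[(ny + 1).toNat]? =
          some (a :: rows[ny.toNat].toList ++ [b]) := by
        rw [show (ny + 1).toNat = ny.toNat + 1 from by omega]
        rw [List.getElem?_append_left (by simp; omega)]
        rw [List.getElem?_cons_succ]
        exact hm
      have hset : ∀ v : List Char, (t :: mid ++ [bb]).set (ny + 1).toNat v =
          t :: mid.set ny.toNat v ++ [bb] := by
        intro v
        rw [show (ny + 1).toNat = ny.toNat + 1 from by omega]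
        rw [List.set_append_left _ _ (by simp; omega)]
        rw [List.set_cons_succ]
      unfold pvStepA
      rw [PySem.List.pyGet?_of_nonneg _ (by omega), emid]
      try dsimp only
      by_cases hx0 : nx = -1
      · -- marks the left padding column; stripped away, B does nothing
        subst hx0
        rw [show (-1 : Int) + 1 = 0 from by norm_num]
        rw [pvMarkA_write _ 0 label (by omega) (by rw [hmlen]; push_cast; omega)
          (by simpa using ha)]
        try dsimp only
        rw [pv_pySet?_of_range (t :: mid ++ [bb]) (ny + 1) _ (by omega) (by simp; omega)]
        refine ⟨_, rfl, ?_⟩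
        rw [pvStepB_in rows (-1) ny label _ hyin hr, if_neg (by rintro ⟨h1, -⟩; omega)]
        refine ⟨t, _, bb, by rw [hset], ⟨htl, htm⟩, ⟨hbl, hbm⟩, ?_⟩
        exact pv_forall₂_set_right hF ny.toNat hr ⟨label, b, by simp, hlab, hb, hwlen⟩
      · by_cases hxw : nx = (w : Int)
        · -- marks the right padding column; stripped away, B does nothing
          subst hxw
          have ext : ((w : Int) + 1).toNat = w + 1 := by omega
          rw [pvMarkA_write _ _ label (by omega) (by rw [hmlen]; push_cast; omega)
            (by rw [ext, show w + 1 = rows[ny.toNat].toList.length + 1 from by rw [hwlen]]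
                simpa [List.getD] using hb)]
          try dsimp only
          rw [pv_pySet?_of_range (t :: mid ++ [bb]) (ny + 1) _ (by omega) (by simp; omega)]
          refine ⟨_, rfl, ?_⟩
          rw [pvStepB_in rows _ ny label _ hyin hr,
            if_neg (by rintro ⟨-, h2, -⟩; rw [hwlen] at h2; omega)]
          refine ⟨t, _, bb, by rw [hset], ⟨htl, htm⟩, ⟨hbl, hbm⟩, ?_⟩
          have htake : (a :: rows[ny.toNat].toList ++ [b]).take (((w : Int) + 1).toNat) =
              a :: rows[ny.toNat].toList := by
            rw [ext, show (a :: rows[ny.toNat].toList ++ [b]) =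
              (a :: rows[ny.toNat].toList) ++ [b] from rfl,
              show w + 1 = (a :: rows[ny.toNat].toList).length from by simp [hwlen],
              List.take_left]
          have hdrop : (a :: rows[ny.toNat].toList ++ [b]).drop (((w : Int) + 1).toNat + 1) =
              ([] : List Char) := by
            rw [ext, List.drop_of_length_le (by rw [hmlen])]
          rw [htake, hdrop]
          exact pv_forall₂_set_right hF ny.toNat hr
            ⟨a, label, by simp, ha, hlab, hwlen⟩
        · -- interior column: both sides test and mark the same maze cell
          have hxin : 0 ≤ nx ∧ nx < (w : Int) := by
            rcases hcross with h | h
            · constructor <;> omega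
            · exact h
          have hxn : nx.toNat < w := by omega
          have ext : (nx + 1).toNat = nx.toNat + 1 := by omega
          have echar : (a :: rows[ny.toNat].toList ++ [b]).getD ((nx + 1).toNat) ' ' =
              rows[ny.toNat].toList.getD nx.toNat ' ' := by
            rw [ext]
            simp [List.getD, List.getElem?_append_left (show nx.toNat <
              rows[ny.toNat].toList.length from by omega)]
          cases hpipe : pvNotPipe (rows[ny.toNat].toList.getD nx.toNat ' ') with
          | true =>
            rw [pvMarkA_write _ _ label (by omega) (by rw [hmlen]; push_cast; omega)
              (by rw [echar]; exact hpipe)]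
            try dsimp only
            rw [pv_pySet?_of_range (t :: mid ++ [bb]) (ny + 1) _ (by omega) (by simp; omega)]
            refine ⟨_, rfl, ?_⟩
            rw [pvStepB_in rows nx ny label _ hyin hr,
              if_pos ⟨by omega, by rw [hwlen]; push_cast; omega, hpipe⟩]
            have htake : (a :: rows[ny.toNat].toList ++ [b]).take ((nx + 1).toNat) =
                a :: rows[ny.toNat].toList.take nx.toNat := by
              rw [ext, show (a :: rows[ny.toNat].toList ++ [b]) =
                a :: (rows[ny.toNat].toList ++ [b]) from rfl]
              rw [List.take_succ_cons, List.take_append_of_le_length (by omega)]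
            have hdrop : (a :: rows[ny.toNat].toList ++ [b]).drop ((nx + 1).toNat + 1) =
                rows[ny.toNat].toList.drop (nx.toNat + 1) ++ [b] := by
              rw [ext, show (a :: rows[ny.toNat].toList ++ [b]) =
                a :: (rows[ny.toNat].toList ++ [b]) from rfl]
              rw [List.drop_succ_cons, List.drop_append_of_le_length (by omega)]
            rw [htake, hdrop]
            refine ⟨t, _, bb, by rw [hset], ⟨htl, htm⟩, ⟨hbl, hbm⟩, ?_⟩
            refine pv_forall₂_set hF ny.toNat ⟨a, b, ?_, ha, hb, ?_⟩
            · rw [String.toList_ofList]; simp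
            · rw [String.toList_ofList]
              simp only [List.length_append, List.length_take, List.length_cons,
                List.length_drop]
              omega
          | false =>
            rw [pvMarkA_skip _ _ label (by omega) (by rw [hmlen]; push_cast; omega)
              (by rw [echar]; exact hpipe)]
            try dsimp only
            rw [pv_pySet?_of_range (t :: mid ++ [bb]) (ny + 1) _ (by omega) (by simp; omega)]
            refine ⟨_, rfl, ?_⟩
            rw [pvStepB_in rows nx ny label _ hyin hr,
              if_neg (by rintro ⟨-, -, h3⟩; rw [hpipe] at h3; exact absurd h3 (by simp))]
            refine ⟨t, _, bb, by rw [hset], ⟨htl, htm⟩, ⟨hbl, hbm⟩, ?_⟩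
            exact pv_forall₂_set_right hF ny.toNat hr ⟨a, b, rfl, ha, hb, hwlen⟩

-- ===== VERDICT (by name: the statement is the Claim_ definition above) =====
theorem mark_adjacent_tiles_spec : Claim_equal_mark_adjacent_tiles := by
  intro maze position facing _ hpre
  obtain ⟨hne, hcond⟩ := hpre
  obtain ⟨r0, rest, rfl⟩ := List.exists_cons_of_ne_nil hne
  unfold Spec_mark_adjacent_tiles mark_adjacent_tiles mark_adjacent_tiles_alt pvOffsets
  dsimp only
  rw [show position.1 + 1 - 1 = (position.1 - 1) + 1 from by ring,
    show position.2 + 1 - 1 = (position.2 - 1) + 1 from by ring]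
  by_cases hN : facing = "N"
  · subst hN
    obtain ⟨huni, hx0, hx1, hy0, hy1⟩ := hcond (Or.inl rfl)
    simp only [List.headD_cons] at huni hx1
    have hInv := pvInv_init (r0 :: rest) r0.toList.length huni
    rw [if_pos rfl, if_pos rfl]
    obtain ⟨p1, hs1, hI1⟩ := pvStep_corr r0.toList.length (r0 :: rest) _
      (position.1 - 1) position.2 'I' hInv (by decide) (by omega) (by omega) (by omega)
      (by omega) (Or.inl ⟨hy0, hy1⟩)
    obtain ⟨p2, hs2, hI2⟩ := pvStep_corr r0.toList.length _ p1
      (position.1 + 1) position.2 'O' hI1 (by decide) (by omega) (by omega) (by omega)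
      (by rw [pvStepB_length]; omega) (Or.inl ⟨hy0, by rw [pvStepB_length]; omega⟩)
    rw [hs1]
    try dsimp only
    rw [hs2]
    try dsimp only
    simp only [List.foldl_cons, List.foldl_nil]
    rw [show position.1 + -1 = position.1 - 1 from by ring, add_zero]
    exact pvInv_strip _ _ _ hI2
  · rw [if_neg hN, if_neg hN]
    by_cases hE : facing = "E"
    · subst hE
      obtain ⟨huni, hx0, hx1, hy0, hy1⟩ := hcond (Or.inr (Or.inl rfl))
      simp only [List.headD_cons] at huni hx1
      have hInv := pvInv_init (r0 :: rest) r0.toList.length huni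
      rw [if_pos rfl, if_neg (by decide), if_pos rfl]
      obtain ⟨p1, hs1, hI1⟩ := pvStep_corr r0.toList.length (r0 :: rest) _
        position.1 (position.2 - 1) 'I' hInv (by decide) (by omega) (by omega) (by omega)
        (by omega) (Or.inr ⟨hx0, by omega⟩)
      obtain ⟨p2, hs2, hI2⟩ := pvStep_corr r0.toList.length _ p1
        position.1 (position.2 + 1) 'O' hI1 (by decide) (by omega) (by omega) (by omega)
        (by rw [pvStepB_length]; omega) (Or.inr ⟨hx0, by omega⟩)
      rw [hs1]
      try dsimp only
      rw [hs2]
      try dsimp only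
      simp only [List.foldl_cons, List.foldl_nil]
      rw [show position.2 + -1 = position.2 - 1 from by ring, add_zero]
      exact pvInv_strip _ _ _ hI2
    · rw [if_neg hE]
      by_cases hS : facing = "S"
      · subst hS
        obtain ⟨huni, hx0, hx1, hy0, hy1⟩ := hcond (Or.inr (Or.inr (Or.inl rfl)))
        simp only [List.headD_cons] at huni hx1
        have hInv := pvInv_init (r0 :: rest) r0.toList.length huni
        rw [if_pos rfl, if_pos rfl]
        obtain ⟨p1, hs1, hI1⟩ := pvStep_corr r0.toList.length (r0 :: rest) _
          (position.1 - 1) position.2 'O' hInv (by decide) (by omega) (by omega) (by omega)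
          (by omega) (Or.inl ⟨hy0, hy1⟩)
        obtain ⟨p2, hs2, hI2⟩ := pvStep_corr r0.toList.length _ p1
          (position.1 + 1) position.2 'I' hI1 (by decide) (by omega) (by omega) (by omega)
          (by rw [pvStepB_length]; omega) (Or.inl ⟨hy0, by rw [pvStepB_length]; omega⟩)
        rw [hs1]
        try dsimp only
        rw [hs2]
        try dsimp only
        simp only [List.foldl_cons, List.foldl_nil]
        rw [show position.1 + -1 = position.1 - 1 from by ring, add_zero]
        exact pvInv_strip _ _ _ hI2
      · rw [if_neg hS, if_neg hS]
        by_cases hW : facing = "W"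
        · subst hW
          obtain ⟨huni, hx0, hx1, hy0, hy1⟩ := hcond (Or.inr (Or.inr (Or.inr rfl)))
          simp only [List.headD_cons] at huni hx1
          have hInv := pvInv_init (r0 :: rest) r0.toList.length huni
          rw [if_pos rfl, if_neg (by decide), if_pos rfl]
          obtain ⟨p1, hs1, hI1⟩ := pvStep_corr r0.toList.length (r0 :: rest) _
            position.1 (position.2 - 1) 'O' hInv (by decide) (by omega) (by omega) (by omega)
            (by omega) (Or.inr ⟨hx0, by omega⟩)
          obtain ⟨p2, hs2, hI2⟩ := pvStep_corr r0.toList.length _ p1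
            position.1 (position.2 + 1) 'I' hI1 (by decide) (by omega) (by omega) (by omega)
            (by rw [pvStepB_length]; omega) (Or.inr ⟨hx0, by omega⟩)
          rw [hs1]
          try dsimp only
          rw [hs2]
          try dsimp only
          simp only [List.foldl_cons, List.foldl_nil]
          rw [show position.2 + -1 = position.2 - 1 from by ring, add_zero]
          exact pvInv_strip _ _ _ hI2
        · rw [if_neg hW, if_neg hE, if_neg hW]
          try dsimp only
          simp only [List.foldl_nil]
          exact pv_strip_pad_map (r0 :: rest) _
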